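-- pv_equiv track=rewrite | github.com/bradh352/ansible-role-service-mirror | files/mirror.py | args_to_cmdline
-- ===== SOURCE A (Python) =====
-- from typing import List, Optional, Tuple
--
-- def args_to_cmdline(args: List[str]) -> str:
--     def quote_arg(arg):
--         if " " not in arg and '"' not in arg and "\\" not in arg and "*" not in arg and "|" not in arg:
--             return arg
--         if "\\" in arg:
--             arg = arg.replace("\\", "\\\\")
--         if '"' in arg:
--             arg = arg.replace('"', '\\"')
--         return f'"{arg}"'
--
--     return " ".join(quote_arg(a) for a in args)
-- ===== SOURCE B (Python) =====
-- def args_to_cmdline(args):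
--     def quote_arg(arg):
--         need_quote = False
--         out = []
--         for ch in arg:
--             if ch == " " or ch == '"' or ch == "\\" or ch == "*" or ch == "|":
--                 need_quote = True
--             if ch == "\\":
--                 out.append("\\\\")
--             elif ch == '"':
--                 out.append('\\"')
--             else:
--                 out.append(ch)
--         if not need_quote:
--             return arg
--         return '"' + "".join(out) + '"'
--
--     return " ".join(quote_arg(a) for a in args)
-- ===== Notes on version B (the rewrite author's own statement) =====
-- stated objective: alternative
-- what changed: Replaces the five substring-membership tests plus two sequential .replace passes with a single character-by-character scan that escapes backslashes and quotes into an accumulator while setting a need_quote flag in the same pass.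
import Mathlib
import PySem

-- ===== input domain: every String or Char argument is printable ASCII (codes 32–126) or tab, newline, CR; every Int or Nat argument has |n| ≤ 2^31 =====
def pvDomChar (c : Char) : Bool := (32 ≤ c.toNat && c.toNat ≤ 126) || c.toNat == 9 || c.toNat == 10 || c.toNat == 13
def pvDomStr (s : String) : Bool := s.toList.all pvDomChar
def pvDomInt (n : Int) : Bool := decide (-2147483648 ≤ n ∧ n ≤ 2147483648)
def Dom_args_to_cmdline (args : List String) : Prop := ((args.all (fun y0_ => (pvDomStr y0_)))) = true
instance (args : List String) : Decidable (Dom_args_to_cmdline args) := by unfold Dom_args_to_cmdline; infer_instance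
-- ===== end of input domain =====

-- B replaces A's five substring tests plus two sequential replace passes by one
-- character-by-character scan per argument (alternative decomposition, same cost).


-- ===== PORT A =====
-- quote_arg of A: five membership tests, then two conditional replace passes, then f'"{arg}"'
-- (the f-string is ported by hand as exact char-list concatenation).
def quoteArgA (arg : String) : String :=
  if !(PySem.Str.isIn " " arg) && !(PySem.Str.isIn "\"" arg) && !(PySem.Str.isIn "\\" arg)
      && !(PySem.Str.isIn "*" arg) && !(PySem.Str.isIn "|" arg) then
    arg
  else
    let arg1 := if PySem.Str.isIn "\\" arg then PySem.Str.replace arg "\\" "\\\\" else arg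
    let arg2 := if PySem.Str.isIn "\"" arg1 then PySem.Str.replace arg1 "\"" "\\\"" else arg1
    String.ofList ('"' :: arg2.toList ++ ['"'])

def args_to_cmdline (args : List String) : String :=
  PySem.Str.join " " (args.map quoteArgA)

-- ===== PORT B =====
-- quote_arg of B: one scan carrying (need_quote, out); wrapped only when need_quote.
def quoteArgB (arg : String) : String :=
  let st := arg.toList.foldl
    (fun (st : Bool × List Char) ch =>
      ((st.1 || (ch == ' ' || ch == '"' || ch == '\\' || ch == '*' || ch == '|')),
       st.2 ++ (if ch == '\\' then ['\\', '\\'] else if ch == '"' then ['\\', '"'] else [ch])))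
    (false, [])
  if !st.1 then arg
  else String.ofList ('"' :: st.2 ++ ['"'])

def args_to_cmdline_alt (args : List String) : String :=
  PySem.Str.join " " (args.map quoteArgB)

-- ===== PRECONDITION & SPEC =====
def Spec_args_to_cmdline (args : List String) (out : String) : Prop := out = args_to_cmdline_alt args
instance (args : List String) (out : String) : Decidable (Spec_args_to_cmdline args out) := by unfold Spec_args_to_cmdline; infer_instance

-- ===== CLAIM (what is proved, stated in full; the proofs are below) =====
def Claim_equal_args_to_cmdline : Prop := ∀ (args : List String), Dom_args_to_cmdline args → Spec_args_to_cmdline args (args_to_cmdline args)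

-- ===== LEMMAS AND PROOFS =====

-- escape of one char, as B performs it
def escChar (ch : Char) : List Char :=
  if ch == '\\' then ['\\', '\\'] else if ch == '"' then ['\\', '"'] else [ch]

def specialChar (ch : Char) : Bool :=
  ch == ' ' || ch == '"' || ch == '\\' || ch == '*' || ch == '|'

-- B's fold, characterized
theorem foldB_eq (l : List Char) (b : Bool) (acc : List Char) :
    l.foldl
      (fun (st : Bool × List Char) ch =>
        ((st.1 || (ch == ' ' || ch == '"' || ch == '\\' || ch == '*' || ch == '|')),
         st.2 ++ (if ch == '\\' then ['\\', '\\'] else if ch == '"' then ['\\', '"'] else [ch])))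
      (b, acc)
    = (b || l.any specialChar, acc ++ l.flatMap escChar) := by
  induction l generalizing b acc with
  | nil => simp
  | cons c t ih =>
    rw [List.foldl_cons, ih]
    simp [specialChar, escChar, Bool.or_assoc]

-- replace with a single-char pattern is a flatMap
theorem replace_go_singleton (c : Char) (new : List Char) (l acc : List Char)
    (fuel : Nat) (hf : l.length ≤ fuel) :
    PySem.Chars.replace.go [c] new fuel l acc
      = acc.reverse ++ l.flatMap (fun x => if x = c then new else [x]) := by
  induction l generalizing fuel acc with
  | nil =>
    cases fuel <;> simp [PySem.Chars.replace.go]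
  | cons x t ih =>
    cases fuel with
    | zero => simp at hf
    | succ n =>
      simp only [List.length_cons, Nat.succ_le_succ_iff] at hf
      by_cases hx : x = c
      · subst hx
        simp [PySem.Chars.replace.go, List.isPrefixOf, ih _ _ hf]
      · simp [PySem.Chars.replace.go, List.isPrefixOf, Ne.symm hx, hx, ih _ _ hf]

theorem replace_singleton (s : List Char) (c : Char) (new : List Char) :
    PySem.Chars.replace s [c] new = s.flatMap (fun x => if x = c then new else [x]) := by
  simp [PySem.Chars.replace, replace_go_singleton c new s [] s.length (le_refl _)]

theorem flatMap_absent (s : List Char) (c : Char) (new : List Char) (h : c ∉ s) :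
    s.flatMap (fun x => if x = c then new else [x]) = s := by
  have hid : ∀ x ∈ s, (if x = c then new else [x]) = [x] := by
    intro x hx
    have : x ≠ c := fun e => h (e ▸ hx)
    simp [this]
  rw [List.flatMap_congr hid]
  simp

-- single-char membership
theorem isIn_singleton (c : Char) (s : List Char) :
    PySem.Chars.isIn [c] s = s.contains c := by
  rcases hc : s.contains c with _ | _
  · have hnot : c ∉ s := by simpa using hc
    rw [PySem.Chars.isIn_eq_false_iff]
    intro hinf
    exact hnot (hinf.subset (by simp))
  · have hmem : c ∈ s := by simpa using hc
    rw [PySem.Chars.isIn_iff_infix]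
    obtain ⟨l1, l2, rfl⟩ := List.append_of_mem hmem
    exact ⟨l1, l2, by simp⟩

-- the two escape passes composed are B's single escape
theorem flatMap_comp (s : List Char) :
    (s.flatMap (fun x => if x = '\\' then ['\\', '\\'] else [x])).flatMap
        (fun x => if x = '"' then ['\\', '"'] else [x])
      = s.flatMap escChar := by
  rw [List.flatMap_assoc]
  apply List.flatMap_congr
  intro x _
  by_cases h1 : x = '\\'
  · subst h1; simp [escChar]
  · by_cases h2 : x = '"'
    · subst h2; simp [escChar]
    · simp [h1, h2, escChar]

-- per-argument equality
theorem quoteArg_eq (arg : String) : quoteArgA arg = quoteArgB arg := by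
  have harg1 : (if PySem.Str.isIn "\\" arg then PySem.Str.replace arg "\\" "\\\\" else arg).toList
      = arg.toList.flatMap (fun x => if x = '\\' then ['\\', '\\'] else [x]) := by
    by_cases h : '\\' ∈ arg.toList
    · have hc : PySem.Str.isIn "\\" arg = true := by
        rw [PySem.Str.isIn_eq]
        show PySem.Chars.isIn ['\\'] arg.toList = true
        rw [isIn_singleton]; simpa using h
      rw [if_pos hc]
      show (PySem.Str.replace arg "\\" "\\\\").toList = _
      rw [PySem.Str.toList_replace]
      show PySem.Chars.replace arg.toList ['\\'] ['\\', '\\'] = _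
      rw [replace_singleton]
    · have hc : PySem.Chars.isIn ['\\'] arg.toList = false := by
        rw [isIn_singleton]; simp [h]
      rw [if_neg (by simp [hc]), flatMap_absent _ _ _ h]
  unfold quoteArgA quoteArgB
  rw [foldB_eq]
  set arg1 := (if PySem.Str.isIn "\\" arg then PySem.Str.replace arg "\\" "\\\\" else arg) with hdef1
  have harg2 : (if PySem.Str.isIn "\"" arg1 then PySem.Str.replace arg1 "\"" "\\\"" else arg1).toList
      = arg.toList.flatMap escChar := by
    by_cases h : '"' ∈ arg1.toList
    · have hc : PySem.Chars.isIn ['"'] arg1.toList = true := by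
        rw [isIn_singleton]; simpa using h
      rw [if_pos (show PySem.Str.isIn "\"" arg1 = true by simp [hc])]
      show (PySem.Str.replace arg1 "\"" "\\\"").toList = _
      rw [PySem.Str.toList_replace]
      show PySem.Chars.replace arg1.toList ['"'] ['\\', '"'] = _
      rw [replace_singleton, harg1, flatMap_comp]
    · have hc : PySem.Chars.isIn ['"'] arg1.toList = false := by
        rw [isIn_singleton]; simp [h]
      rw [if_neg (by simp [hc]), harg1, ← flatMap_comp, ← harg1, flatMap_absent _ _ _ h, harg1]
  have hany : (!(PySem.Str.isIn " " arg) && !(PySem.Str.isIn "\"" arg) && !(PySem.Str.isIn "\\" arg)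
      && !(PySem.Str.isIn "*" arg) && !(PySem.Str.isIn "|" arg)) = !(arg.toList.any specialChar) := by
    have e1 : PySem.Str.isIn " " arg = arg.toList.contains ' ' := by
      rw [PySem.Str.isIn_eq]; exact isIn_singleton ' ' arg.toList
    have e2 : PySem.Str.isIn "\"" arg = arg.toList.contains '"' := by
      rw [PySem.Str.isIn_eq]; exact isIn_singleton '"' arg.toList
    have e3 : PySem.Str.isIn "\\" arg = arg.toList.contains '\\' := by
      rw [PySem.Str.isIn_eq]; exact isIn_singleton '\\' arg.toList
    have e4 : PySem.Str.isIn "*" arg = arg.toList.contains '*' := by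
      rw [PySem.Str.isIn_eq]; exact isIn_singleton '*' arg.toList
    have e5 : PySem.Str.isIn "|" arg = arg.toList.contains '|' := by
      rw [PySem.Str.isIn_eq]; exact isIn_singleton '|' arg.toList
    rw [e1, e2, e3, e4, e5]
    rcases hs : arg.toList.any specialChar with _ | _
    · simp only [List.any_eq_false] at hs
      have m1 : ' ' ∉ arg.toList := fun hm => by simpa [specialChar] using hs ' ' hm
      have m2 : '"' ∉ arg.toList := fun hm => by simpa [specialChar] using hs '"' hm
      have m3 : '\\' ∉ arg.toList := fun hm => by simpa [specialChar] using hs '\\' hm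
      have m4 : '*' ∉ arg.toList := fun hm => by simpa [specialChar] using hs '*' hm
      have m5 : '|' ∉ arg.toList := fun hm => by simpa [specialChar] using hs '|' hm
      simp [m1, m2, m3, m4, m5]
    · rcases List.any_eq_true.mp hs with ⟨c, hc, hsp⟩
      simp only [specialChar, Bool.or_eq_true, beq_iff_eq] at hsp
      rcases hsp with ((((rfl | rfl) | rfl) | rfl) | rfl) <;> simp [List.elem_eq_true_of_mem hc] <;> tauto
  rw [hany]
  by_cases hn : arg.toList.any specialChar = true
  · rw [hn]
    simp only [Bool.not_true, Bool.false_or, Bool.false_eq_true, if_false]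
    rw [harg2]
    simp
  · simp [hn]

-- ===== VERDICT (by name: the statement is the Claim_ definition above) =====
theorem args_to_cmdline_spec : Claim_equal_args_to_cmdline := by
  intro args _
  unfold Spec_args_to_cmdline args_to_cmdline args_to_cmdline_alt
  rw [List.map_congr_left (fun a _ => quoteArg_eq a)]
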